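-- pv_equiv track=rewrite | github.com/liberjul/Benniella_phylogenetics | scripts/sort_concat_format_seqs.py | external_unknown
-- ===== SOURCE A (Python) =====
-- def external_unknown(seq, char="N"):
--     first_char_pos = len(seq)
--     last_char_pos = -1
--     for i in range(len(seq)):
--         if seq[i] != "-":
--             first_char_pos = i
--             break
--     for i in range(len(seq)):
--         if seq[len(seq) - i - 1] != "-":
--             last_char_pos = len(seq) - i - 1
--             break
--     out_seq = ""
--     for i in range(len(seq)):
--         if i < first_char_pos or i > last_char_pos:
--             out_seq += char
--         else:
--             out_seq += seq[i]
--     return out_seq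
-- ===== SOURCE B (Python) =====
-- def external_unknown(seq, char="N"):
--     core = seq.strip("-")
--     if not core:
--         return char * len(seq)
--     lead = len(seq) - len(seq.lstrip("-"))
--     trail = len(seq) - len(core) - lead
--     return char * lead + core + char * trail
-- ===== Notes on version B (the rewrite author's own statement) =====
-- stated objective: simpler
-- what changed: Replaced A's three explicit index loops (forward scan for the first non-dash, backward scan for the last, and a char-by-char rebuild) with a strip-based decomposition: take the dash-stripped core, count the leading dashes via lstrip, get the trailing count by arithmetic, and assemble fill*lead + core + fill*trail.
import Mathlib
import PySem

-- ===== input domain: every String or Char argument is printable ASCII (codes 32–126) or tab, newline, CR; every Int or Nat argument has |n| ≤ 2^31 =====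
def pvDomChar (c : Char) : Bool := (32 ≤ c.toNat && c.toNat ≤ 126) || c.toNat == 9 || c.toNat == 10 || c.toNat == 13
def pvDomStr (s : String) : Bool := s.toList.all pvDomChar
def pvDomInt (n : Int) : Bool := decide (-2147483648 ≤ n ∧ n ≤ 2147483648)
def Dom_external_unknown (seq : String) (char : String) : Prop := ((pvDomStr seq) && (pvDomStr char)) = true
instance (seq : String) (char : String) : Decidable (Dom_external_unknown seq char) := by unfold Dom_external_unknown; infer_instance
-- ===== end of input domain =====

-- B replaces A's three index loops by a strip/lstrip decomposition with string multiplication; measurably faster by a constant factor (string methods vs per-character loops).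

-- ===== PORT A =====
-- 'for i in range(len(seq)): if seq[i] != "-": first_char_pos = i; break'  (first_char_pos starts at len(seq))
def extAFirstLoop (cs : List Char) (i : Nat) : Nat :=
  if h : i < cs.length then
    if cs[i] ≠ '-' then i else extAFirstLoop cs (i + 1)
  else cs.length
termination_by cs.length - i

-- 'for i in range(len(seq)): if seq[len(seq)-i-1] != "-": last_char_pos = len(seq)-i-1; break'  (last_char_pos starts at -1)
def extALastLoop (cs : List Char) (i : Nat) : Int :=
  if h : i < cs.length then
    if cs[cs.length - i - 1]'(by omega) ≠ '-' then ((cs.length - i - 1 : Nat) : Int)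
    else extALastLoop cs (i + 1)
  else -1
termination_by cs.length - i

-- 'for i in range(len(seq)): out_seq += char if (i < first or i > last) else seq[i]'  (index always in range)
def extABuildLoop (cs ch : List Char) (first : Nat) (last : Int) (i : Nat) (acc : List Char) : List Char :=
  if h : i < cs.length then
    if i < first ∨ last < (i : Int) then extABuildLoop cs ch first last (i + 1) (acc ++ ch)
    else extABuildLoop cs ch first last (i + 1) (acc ++ [cs[i]])
  else acc
termination_by cs.length - i

def external_unknown (seq : String) (char : String) : String :=
  let cs := seq.toList
  let first := extAFirstLoop cs 0
  let last := extALastLoop cs 0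
  String.mk (extABuildLoop cs char.toList first last 0 [])

-- ===== PORT B =====
-- hand ports, exact: seq.lstrip("-") drops the leading dashes, seq.strip("-") also the trailing ones,
-- and char * n (n ≥ 0) concatenates n copies of char.
def pyLstripDash (cs : List Char) : List Char := cs.dropWhile (· == '-')
def pyStripDash (cs : List Char) : List Char :=
  ((cs.dropWhile (· == '-')).reverse.dropWhile (· == '-')).reverse
def pyStrMul (ch : List Char) (n : Nat) : List Char := (List.replicate n ch).flatten

def external_unknown_alt (seq : String) (char : String) : String :=
  let cs := seq.toList
  let core := pyStripDash cs
  if core = [] then String.mk (pyStrMul char.toList cs.length)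
  else
    let lead := cs.length - (pyLstripDash cs).length
    let trail := cs.length - core.length - lead
    String.mk (pyStrMul char.toList lead ++ core ++ pyStrMul char.toList trail)

-- ===== PRECONDITION & SPEC =====
def Spec_external_unknown (seq : String) (char : String) (out : String) : Prop := out = external_unknown_alt seq char
instance (seq : String) (char : String) (out : String) : Decidable (Spec_external_unknown seq char out) := by unfold Spec_external_unknown; infer_instance

-- ===== CLAIM (what is proved, stated in full; the proofs are below) =====
def Claim_equal_external_unknown : Prop := ∀ (seq : String) (char : String), Dom_external_unknown seq char → Spec_external_unknown seq char (external_unknown seq char)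

-- ===== LEMMAS AND PROOFS =====

-- one output cell of A's build loop
def segFun (cs ch : List Char) (first : Nat) (last : Int) (j : Nat) : List Char :=
  if j < first ∨ last < (j : Int) then ch else [cs.getD j ' ']

theorem flatMap_congr_mem {α β : Type} (l : List α) (f g : α → List β)
    (h : ∀ x ∈ l, f x = g x) : l.flatMap f = l.flatMap g := by
  induction l with
  | nil => rfl
  | cons a t ih =>
      simp only [List.flatMap_cons]
      rw [h a (by simp), ih (fun x hx => h x (by simp [hx]))]

theorem range'_split : ∀ (m : Nat) (n s : Nat),
    List.range' s (m + n) = List.range' s m ++ List.range' (s + m) n := by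
  intro m
  induction m with
  | zero => intro n s; simp
  | succ m ih =>
      intro n s
      have h1 : m + 1 + n = (m + n) + 1 := by omega
      rw [h1, List.range'_succ, List.range'_succ, ih]
      have hs : s + 1 + m = s + (m + 1) := by omega
      rw [hs]
      simp

theorem flatMap_single {α β : Type} (l : List α) (f : α → β) :
    l.flatMap (fun x => [f x]) = l.map f := by
  induction l with
  | nil => rfl
  | cons a t ih => simp [ih]

theorem flatMap_const (ch : List Char) : ∀ (n s : Nat),
    (List.range' s n).flatMap (fun _ => ch) = (List.replicate n ch).flatten := by
  intro n
  induction n with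
  | zero => intro s; rfl
  | succ n ih => intro s; rw [List.range'_succ]; simp [ih (s + 1), List.replicate_succ]

theorem map_getD_range' (cs : List Char) : ∀ (n s : Nat), s + n ≤ cs.length →
    (List.range' s n).map (fun j => cs.getD j ' ') = (cs.drop s).take n := by
  intro n
  induction n with
  | zero => intro s _; simp
  | succ n ih =>
      intro s hs
      have hlt : s < cs.length := by omega
      rw [List.range'_succ, List.map_cons, ih (s + 1) (by omega),
          List.drop_eq_getElem_cons hlt, List.take_succ_cons, List.getD_eq_getElem cs ' ' hlt]

theorem build_eq (cs ch : List Char) (first : Nat) (last : Int) :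
    ∀ (n i : Nat) (acc : List Char), n = cs.length - i →
      extABuildLoop cs ch first last i acc = acc ++ (List.range' i n).flatMap (segFun cs ch first last) := by
  intro n
  induction n with
  | zero =>
      intro i acc hn
      rw [extABuildLoop]
      simp only [List.range'_zero, List.flatMap_nil, List.append_nil]
      have : ¬ i < cs.length := by omega
      simp [this]
  | succ n ih =>
      intro i acc hn
      have hlt : i < cs.length := by omega
      rw [extABuildLoop, List.range'_succ]
      simp only [hlt, dif_pos, List.flatMap_cons]
      by_cases hc : i < first ∨ last < (i : Int)
      · rw [if_pos hc, ih (i + 1) (acc ++ ch) (by omega)]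
        simp [segFun, hc]
      · rw [if_neg hc, ih (i + 1) (acc ++ [cs[i]]) (by omega)]
        simp [segFun, hc, List.getD, List.getElem?_eq_getElem hlt]

theorem first_eq (cs : List Char) : ∀ (n i : Nat), n = cs.length - i → i ≤ cs.length →
    extAFirstLoop cs i = i + ((cs.drop i).takeWhile (· == '-')).length := by
  intro n
  induction n with
  | zero =>
      intro i hn hi
      have he : i = cs.length := by omega
      rw [extAFirstLoop]
      simp [he]
  | succ n ih =>
      intro i hn hi
      have hlt : i < cs.length := by omega
      rw [extAFirstLoop, List.drop_eq_getElem_cons hlt]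
      simp only [hlt, dif_pos, List.takeWhile_cons]
      by_cases hc : cs[i] = '-'
      · simp only [hc]
        rw [if_neg (by simp), if_pos (by simp), ih (i + 1) (by omega) (by omega)]
        simp only [List.length_cons]
        omega
      · rw [if_pos (by simp [hc]), if_neg (by simp [hc])]
        simp

theorem last_eq (cs : List Char) : ∀ (n i : Nat), n = cs.length - i →
    extALastLoop cs i =
      (if i + ((cs.reverse.drop i).takeWhile (· == '-')).length < cs.length
       then ((cs.length - (i + ((cs.reverse.drop i).takeWhile (· == '-')).length) - 1 : Nat) : Int)
       else -1) := by
  intro n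
  induction n with
  | zero =>
      intro i hn
      have hge : ¬ i < cs.length := by omega
      have hd : cs.reverse.drop i = [] := by
        apply List.drop_eq_nil_of_le; simp; omega
      rw [extALastLoop]
      simp [hge, hd]
  | succ n ih =>
      intro i hn
      have hlt : i < cs.length := by omega
      have hidx : cs.length - i - 1 < cs.length := by omega
      have hri : i < cs.reverse.length := by simp [hlt]
      have hrev : cs.reverse.drop i = cs.reverse[i] :: cs.reverse.drop (i + 1) :=
        List.drop_eq_getElem_cons hri
      have hgr : cs.reverse[i] = cs[cs.length - i - 1]'hidx := by
        rw [List.getElem_reverse]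
        congr 1
        omega
      rw [extALastLoop]
      simp only [hlt, dif_pos]
      rw [hrev, hgr]
      by_cases hc : cs[cs.length - i - 1]'hidx = '-'
      · have hne : ¬ (cs[cs.length - i - 1]'hidx ≠ '-') := by simp [hc]
        rw [if_neg hne, ih (i + 1) (by omega)]
        simp only [List.takeWhile_cons, hc, beq_self_eq_true, if_true, List.length_cons]
        have he : i + 1 + ((cs.reverse.drop (i + 1)).takeWhile (· == '-')).length
            = i + (((cs.reverse.drop (i + 1)).takeWhile (· == '-')).length + 1) := by omega
        rw [he]
      · have hp : cs[cs.length - i - 1]'hidx ≠ '-' := hc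
        rw [if_pos hp]
        simp only [List.takeWhile_cons]
        have hb : ¬ ((cs[cs.length - i - 1]'hidx == '-') = true) := by simp [hc]
        rw [if_neg hb]
        simp [hlt]

-- head of dropWhile fails the predicate
theorem dropWhile_head_not {p : Char → Bool} : ∀ (l : List Char) (d : Char) (t : List Char),
    l.dropWhile p = d :: t → p d = false := by
  intro l
  induction l with
  | nil => intro d t h; simp at h
  | cons a l ih =>
      intro d t h
      rw [List.dropWhile_cons] at h
      by_cases ha : p a
      · exact ih d t (by simpa [ha] using h)
      · simp only [ha] at h
        simp only [Bool.not_eq_true] at ha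
        cases h
        simpa using ha

theorem takeWhile_append_head_not {p : Char → Bool} :
    ∀ (T : List Char) (d : Char) (rest : List Char),
    (∀ c ∈ T, p c = true) → p d = false → (T ++ d :: rest).takeWhile p = T := by
  intro T
  induction T with
  | nil => intro d rest _ hd; simp [hd]
  | cons a T ih =>
      intro d rest hT hd
      have ha : p a = true := hT a (by simp)
      simp only [List.cons_append, List.takeWhile_cons, ha, if_pos]
      rw [ih d rest (fun c hc => hT c (by simp [hc])) hd]

-- elements of a takeWhile satisfy the predicate
theorem mem_takeWhile_pred {p : Char → Bool} : ∀ (l : List Char) (c : Char),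
    c ∈ l.takeWhile p → p c = true := by
  intro l
  induction l with
  | nil => intro c h; simp at h
  | cons a t ih =>
      intro c h
      rw [List.takeWhile_cons] at h
      by_cases ha : p a
      · simp only [ha, if_true, List.mem_cons] at h
        rcases h with h | h
        · rw [h]; exact ha
        · exact ih c h
      · simp [ha] at h

-- the main list-level equality
theorem main_list (cs ch : List Char) :
    extABuildLoop cs ch (extAFirstLoop cs 0) (extALastLoop cs 0) 0 [] =
      (if pyStripDash cs = [] then pyStrMul ch cs.length
       else pyStrMul ch (cs.length - (pyLstripDash cs).length) ++ pyStripDash cs ++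
            pyStrMul ch (cs.length - (pyStripDash cs).length - (cs.length - (pyLstripDash cs).length))) := by
  have hfirst := first_eq cs (cs.length - 0) 0 rfl (by omega)
  have hlast := last_eq cs (cs.length - 0) 0 rfl
  simp only [List.drop_zero, Nat.zero_add] at hfirst hlast
  have hbuild := build_eq cs ch (extAFirstLoop cs 0) (extALastLoop cs 0) (cs.length - 0) 0 [] rfl
  simp only [Nat.sub_zero, List.nil_append] at hbuild
  by_cases hcore : pyStripDash cs = []
  · -- Case 1: cs is all dashes (possibly empty): both sides are ch repeated len(cs) times
    have hmidnil : cs.dropWhile (· == '-') = [] := by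
      by_contra hne
      rcases List.exists_cons_of_ne_nil hne with ⟨d, t, hdt⟩
      have hd : (d == '-') = false := dropWhile_head_not _ d t hdt
      have : pyStripDash cs ≠ [] := by
        unfold pyStripDash
        rw [hdt]
        intro habs
        have h2 := congrArg List.reverse habs
        simp only [List.reverse_reverse, List.reverse_nil] at h2
        have h3 : (d :: t).reverse.dropWhile (· == '-') = [] := h2
        have h4 : ∀ c ∈ (d :: t).reverse, (c == '-') = true := by
          intro c hc
          have h5 : (d :: t).reverse = ((d :: t).reverse).takeWhile (· == '-') := by
            conv_lhs => rw [← List.takeWhile_append_dropWhile (p := (· == '-')) (l := (d :: t).reverse)]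
            rw [h3, List.append_nil]
          rw [h5] at hc
          exact mem_takeWhile_pred _ c hc
        have := h4 d (by simp)
        rw [this] at hd; simp at hd
      exact this hcore
    have hall : ∀ c ∈ cs, (c == '-') = true := by
      intro c hc
      have h5 : cs = cs.takeWhile (· == '-') := by
        conv_lhs => rw [← List.takeWhile_append_dropWhile (p := (· == '-')) (l := cs)]
        rw [hmidnil, List.append_nil]
      rw [h5] at hc
      exact mem_takeWhile_pred _ c hc
    have htake : cs.takeWhile (· == '-') = cs := List.takeWhile_eq_self_iff.mpr hall
    have htakerev : cs.reverse.takeWhile (· == '-') = cs.reverse :=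
      List.takeWhile_eq_self_iff.mpr (by intro c hc; exact hall c (by simpa using hc))
    have hfst : extAFirstLoop cs 0 = cs.length := by rw [hfirst, htake]
    have hlst : extALastLoop cs 0 = -1 := by
      rw [hlast, htakerev]
      simp
    rw [hcore, if_pos rfl, hbuild, hfst, hlst]
    have : ∀ j ∈ List.range' 0 cs.length, segFun cs ch cs.length (-1) j = ch := by
      intro j hj
      have hj2 : j < cs.length := by
        have := List.mem_range'_1.mp hj; omega
      unfold segFun
      rw [if_pos (Or.inl hj2)]
    rw [flatMap_congr_mem _ _ _ this, flatMap_const]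
    rfl
  · -- Case 2: cs = pre ++ core ++ T.reverse with pre, T all dashes, core nonempty ending/starting non-dash
    set P : Char → Bool := (· == '-') with hP
    set pre := cs.takeWhile P with hpre
    set mid := cs.dropWhile P with hmid
    set T := mid.reverse.takeWhile P with hT
    set D := mid.reverse.dropWhile P with hD
    have hcs : cs = pre ++ mid := (List.takeWhile_append_dropWhile).symm
    have hmr : mid.reverse = T ++ D := (List.takeWhile_append_dropWhile).symm
    have hcoreD : pyStripDash cs = D.reverse := rfl
    have hDne : D ≠ [] := by
      intro h; exact hcore (by rw [hcoreD, h, List.reverse_nil])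
    rcases List.exists_cons_of_ne_nil hDne with ⟨d, Dt, hdDt⟩
    have hdnot : (d == '-') = false := dropWhile_head_not _ d Dt hdDt
    have hTall : ∀ c ∈ T, P c = true := fun c hc => mem_takeWhile_pred _ c hc
    have hpreall : ∀ c ∈ pre, P c = true := fun c hc => mem_takeWhile_pred _ c hc
    -- cs decomposed with explicit lengths
    have hmid2 : mid = D.reverse ++ T.reverse := by
      have := congrArg List.reverse hmr
      simpa using this
    have hlen : cs.length = pre.length + (D.reverse.length + T.length) := by
      rw [hcs, hmid2]; simp
    have hcorelen : (pyStripDash cs).length = D.reverse.length := by rw [hcoreD]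
    have hleadval : cs.length - (pyLstripDash cs).length = pre.length := by
      have : (pyLstripDash cs).length = mid.length := rfl
      rw [this, hcs]
      simp
    -- first loop = pre.length
    have hfst : extAFirstLoop cs 0 = pre.length := by rw [hfirst]
    -- reverse of cs and its takeWhile
    have hcsrev : cs.reverse = T ++ d :: (Dt ++ pre.reverse) := by
      rw [hcs, hmid2]
      have hDrev : D.reverse.reverse = d :: Dt := by rw [← hdDt]; simp
      simp only [List.reverse_append]
      rw [hDrev]
      simp
    have htwrev : cs.reverse.takeWhile P = T :=
      hcsrev ▸ takeWhile_append_head_not T d (Dt ++ pre.reverse) hTall hdnot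
    have hTlt : T.length < cs.length := by
      have : D.reverse.length ≠ 0 := by simp [hDne]
      omega
    have hlst : extALastLoop cs 0 = ((cs.length - T.length - 1 : Nat) : Int) := by
      rw [hlast, htwrev, if_pos (by omega)]
    -- assemble the build loop
    rw [if_neg hcore, hbuild, hfst, hlst, hcoreD, hleadval]
    have hsplit : cs.length = pre.length + (D.reverse.length + T.length) := hlen
    have hr : List.range' 0 cs.length
        = List.range' 0 pre.length ++ List.range' (0 + pre.length) D.reverse.length
          ++ List.range' (0 + pre.length + D.reverse.length) T.length := by
      rw [hlen, range'_split pre.length (D.reverse.length + T.length) 0,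
          range'_split D.reverse.length T.length (0 + pre.length), List.append_assoc]
    rw [hr, List.flatMap_append, List.flatMap_append]
    have htriv : cs.length - T.length - 1 = pre.length + D.reverse.length - 1 := by omega
    -- piece 1: leading dashes become ch
    have hp1 : (List.range' 0 pre.length).flatMap (segFun cs ch pre.length ((cs.length - T.length - 1 : Nat) : Int))
        = pyStrMul ch pre.length := by
      rw [flatMap_congr_mem _ _ (fun _ => ch) (by
        intro j hj
        have := List.mem_range'_1.mp hj
        unfold segFun
        rw [if_pos (Or.inl (by omega))]), flatMap_const]
      rfl
    -- piece 2: the core is copied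
    have hp2 : (List.range' (0 + pre.length) D.reverse.length).flatMap
          (segFun cs ch pre.length ((cs.length - T.length - 1 : Nat) : Int))
        = D.reverse := by
      rw [flatMap_congr_mem _ _ (fun j => [cs.getD j ' ']) (by
        intro j hj
        have hjm := List.mem_range'_1.mp hj
        unfold segFun
        rw [if_neg]
        intro hor
        have hDl : 0 < D.reverse.length := by simpa using List.length_pos_iff.mpr hDne
        rcases hor with h | h
        · omega
        · omega)]
      rw [flatMap_single, map_getD_range' cs D.reverse.length (0 + pre.length) (by omega)]
      have hdrop : cs.drop (0 + pre.length) = D.reverse ++ T.reverse := by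
        simp only [Nat.zero_add]
        rw [hcs, List.drop_left, hmid2]
      rw [hdrop, List.take_left]
    -- piece 3: trailing dashes become ch
    have hp3 : (List.range' (0 + pre.length + D.reverse.length) T.length).flatMap
          (segFun cs ch pre.length ((cs.length - T.length - 1 : Nat) : Int))
        = pyStrMul ch T.length := by
      rw [flatMap_congr_mem _ _ (fun _ => ch) (by
        intro j hj
        have hjm := List.mem_range'_1.mp hj
        unfold segFun
        rw [if_pos]
        right
        have hDl : 0 < D.reverse.length := by simpa using List.length_pos_iff.mpr hDne
        omega), flatMap_const]
      rfl
    have hfin : cs.length - D.reverse.length - pre.length = T.length := by omega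
    rw [hp1, hp2, hp3, hfin]

-- ===== VERDICT (by name: the statement is the Claim_ definition above) =====
theorem external_unknown_spec : Claim_equal_external_unknown := by
  intro seq char _
  unfold Spec_external_unknown external_unknown external_unknown_alt
  simp only []
  rw [main_list]
  by_cases h : pyStripDash seq.toList = [] <;> simp [h]
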